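-- pv_equiv track=rewrite | github.com/arivero/physres2 | results/su6_branching.py | su_rep_dim_from_partition
-- ===== SOURCE A (Python) =====
-- def su_rep_dim_from_partition(partition, n):
--     """
--     Dimension of SU(n) representation from a partition (Young diagram row lengths).
--     Uses the hook-length formula: prod_{boxes} (n + content) / hook_length
--     where content of box (i,j) is j-i (0-indexed).
--     """
--     if not partition:
--         return 1
--     # Pad partition to have n rows
--     rows = list(partition) + [0] * (n - len(partition))
--     # Build the Young diagram boxes
--     boxes = []
--     for i, r in enumerate(rows):
--         for j in range(r):
--             boxes.append((i, j))
--     # Compute numerator: product of (n + content) for each box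
--     num = 1
--     for (i, j) in boxes:
--         num *= (n + j - i)
--     # Compute denominator: product of hook lengths
--     denom = 1
--     for (i, j) in boxes:
--         # hook length = arm + leg + 1
--         arm = rows[i] - j - 1  # boxes to the right
--         leg = sum(1 for ii in range(i + 1, n) if rows[ii] > j)  # boxes below
--         denom *= (arm + leg + 1)
--     return num // denom
-- ===== SOURCE B (Python) =====
-- def su_rep_dim_from_partition(partition, n):
--     """
--     Dimension of SU(n) representation from a partition (Young diagram row lengths).
--     Single backward pass over the rows: a column-count array cnt (cnt[j] = number of
--     already-seen rows, with index < n, longer than j) gives each leg length by a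
--     single lookup, so no inner scan over the rows is needed.
--     """
--     if not partition:
--         return 1
--     rows = list(partition) + [0] * (n - len(partition))
--     num = 1
--     denom = 1
--     cnt = []  # cnt[j] = number of rows below the current one (index < n) with length > j
--     for i, r in reversed(list(enumerate(rows))):
--         for j in range(r):
--             num *= (n + j - i)
--             leg = cnt[j] if j < len(cnt) else 0
--             denom *= (r - j - 1 + leg + 1)
--         if i < n:
--             for j in range(r):
--                 if j < len(cnt):
--                     cnt[j] += 1
--                 else:
--                     cnt.append(1)
--     return num // denom
-- ===== Notes on version B (the rewrite author's own statement) =====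
-- stated objective: alternative
-- what changed: Instead of materialising the box list and rescanning all rows below each box to count its leg length, B makes one backward pass over the rows maintaining a column-count array that yields each leg length by a single lookup; it trades A's inner scans for the upkeep of that array.
import Mathlib
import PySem

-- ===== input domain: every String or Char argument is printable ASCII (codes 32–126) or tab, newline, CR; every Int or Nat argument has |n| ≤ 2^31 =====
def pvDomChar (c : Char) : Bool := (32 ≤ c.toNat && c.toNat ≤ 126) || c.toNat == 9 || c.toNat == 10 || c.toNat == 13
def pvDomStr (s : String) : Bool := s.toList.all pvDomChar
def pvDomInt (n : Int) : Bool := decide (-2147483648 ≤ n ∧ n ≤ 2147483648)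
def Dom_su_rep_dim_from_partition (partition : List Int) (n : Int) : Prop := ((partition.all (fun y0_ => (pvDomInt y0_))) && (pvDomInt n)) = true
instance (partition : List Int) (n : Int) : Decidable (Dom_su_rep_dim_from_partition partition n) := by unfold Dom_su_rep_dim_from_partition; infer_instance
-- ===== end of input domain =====

-- B replaces A's per-box rescan of the rows below (the leg length) by a column-count
-- array maintained in one backward pass over the rows, read by a single lookup per box;
-- equivalence of the return values is proved for all inputs (both programs are total).

-- ===== PORT A =====
-- shared by both ports: Python's `list(partition) + [0] * (n - len(partition))`
-- ([0] * k is [] for k < 0, exactly Int.toNat's clamping)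
def pvRows (partition : List Int) (n : Int) : List Int :=
  partition ++ List.replicate (n - (partition.length : Int)).toNat 0

-- Port of A: build the explicit box list, then two passes over the boxes; the leg of each
-- box is recomputed by scanning range(i+1, n).  rows[i] and rows[ii] are ported with
-- pyGetD: both indices are always in range here (ii < n ≤ len(rows)), so this is exact.
def su_rep_dim_from_partition (partition : List Int) (n : Int) : Int :=
  if partition = [] then 1
  else
    let rows := pvRows partition n
    -- `for i, r in enumerate(rows)` ported as a foldl carrying the running index i
    let boxes := (rows.foldl
      (fun st r => (st.1 + 1,
        (PySem.List.pyRange 0 r).foldl (fun acc2 j => acc2 ++ [(st.1, j)]) st.2))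
      ((0 : Int), ([] : List (Int × Int)))).2
    let num := boxes.foldl (fun a b => a * (n + b.2 - b.1)) 1
    let denom := boxes.foldl (fun a b =>
      let arm := PySem.List.pyGetD rows b.1 0 - b.2 - 1
      let leg := (PySem.List.pyRange (b.1 + 1) n).foldl
        (fun s ii => if PySem.List.pyGetD rows ii 0 > b.2 then s + 1 else s) 0
      a * (arm + leg + 1)) 1
    PySem.Int.floordiv num denom

-- ===== PORT B =====
-- B-side helpers, mirroring Source B line by line.
-- `cnt[j] if j < len(cnt) else 0`
def pvCntGet (c : List Int) (j : Int) : Int :=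
  if j < PySem.List.len c then PySem.List.pyGetD c j 0 else 0

-- the inner `for j in range(r)` loop over the state (num, denom, cnt)
def pvInnerB (n i r : Int) (st : Int × Int × List Int) : Int × Int × List Int :=
  (PySem.List.pyRange 0 r).foldl
    (fun st2 j =>
      (st2.1 * (n + j - i), st2.2.1 * (r - j - 1 + pvCntGet st2.2.2 j + 1), st2.2.2)) st

-- `for j in range(r): cnt[j] += 1 if j < len(cnt) else cnt.append(1)`
def pvBumpB (c : List Int) (r : Int) : List Int :=
  (PySem.List.pyRange 0 r).foldl
    (fun c j => if j < PySem.List.len c then PySem.List.pySetD c j (PySem.List.pyGetD c j 0 + 1)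
                else c ++ [1]) c

-- one iteration of the backward row loop, on the pair (i, r)
def pvStepB (n : Int) (st : Int × Int × List Int) (p : Int × Int) :
    Int × Int × List Int :=
  let i := p.1
  let r := p.2
  let st2 := pvInnerB n i r st
  if i < n then (st2.1, st2.2.1, pvBumpB st2.2.2 r) else st2

-- Port of B: one backward pass `for i, r in reversed(list(enumerate(rows)))` carrying
-- (num, denom, cnt); `reversed(list(enumerate(rows)))` is built by an index-carrying
-- foldl that prepends, producing the reversed enumerated list.
def su_rep_dim_from_partition_alt (partition : List Int) (n : Int) : Int :=
  if partition = [] then 1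
  else
    let rows := pvRows partition n
    let st := ((rows.foldl (fun st r => (st.1 + 1, (st.1, r) :: st.2))
        ((0 : Int), ([] : List (Int × Int)))).2).foldl (pvStepB n) (1, 1, ([] : List Int))
    PySem.Int.floordiv st.1 st.2.1

-- ===== PRECONDITION & SPEC =====
def Spec_su_rep_dim_from_partition (partition : List Int) (n : Int) (out : Int) : Prop := out = su_rep_dim_from_partition_alt partition n
instance (partition : List Int) (n : Int) (out : Int) : Decidable (Spec_su_rep_dim_from_partition partition n out) := by unfold Spec_su_rep_dim_from_partition; infer_instance

-- ===== CLAIM (what is proved, stated in full; the proofs are below) =====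
def Claim_equal_su_rep_dim_from_partition : Prop := ∀ (partition : List Int) (n : Int), Dom_su_rep_dim_from_partition partition n → Spec_su_rep_dim_from_partition partition n (su_rep_dim_from_partition partition n)

-- ===== LEMMAS AND PROOFS =====

-- A's leg of box (i, j): the count computed by A's inner scan over range(i+1, n)
def pvLeg (rows : List Int) (n i j : Int) : Int :=
  (PySem.List.pyRange (i + 1) n).foldl
    (fun s ii => if PySem.List.pyGetD rows ii 0 > j then s + 1 else s) 0

-- the numerator / denominator contribution of the row of length r at index i
def pvRowNum (n i r : Int) : Int :=
  ((PySem.List.pyRange 0 r).map (fun j => n + j - i)).prod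

def pvRowDen (rows : List Int) (n i r : Int) : Int :=
  ((PySem.List.pyRange 0 r).map (fun j => r - j - 1 + pvLeg rows n i j + 1)).prod

-- a multiplying foldl is a product
theorem pvFoldMul {α : Type} (f : α → Int) (l : List α) :
    ∀ (init : Int), l.foldl (fun a x => a * f x) init = init * (l.map f).prod := by
  induction l with
  | nil => simp
  | cons x l ih => intro init; simp [ih, mul_assoc]

-- an index-carrying foldl is a foldl over the enumerated list
theorem pvEnumFold {β : Type} (g : Int → Int → β → β) :
    ∀ (rows : List Int) (i0 : Int) (acc : β),
      (rows.foldl (fun st r => (st.1 + 1, g st.1 r st.2)) (i0, acc)).2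
        = (PySem.List.enumerate rows i0).foldl (fun acc p => g p.1 p.2 acc) acc := by
  intro rows
  induction rows with
  | nil => intro i0 acc; rfl
  | cons r rows ih => intro i0 acc; simp [PySem.List.enumerate_cons, ih]

-- the prepending index-carrying foldl builds the reversed enumerated list
theorem pvEnumRev :
    ∀ (rows : List Int) (i0 : Int) (acc : List (Int × Int)),
      (rows.foldl (fun st r => (st.1 + 1, (st.1, r) :: st.2)) (i0, acc)).2
        = (PySem.List.enumerate rows i0).reverse ++ acc := by
  intro rows
  induction rows with
  | nil => intro i0 acc; rfl
  | cons r rows ih => intro i0 acc; simp [PySem.List.enumerate_cons, ih]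

theorem pvRows_nLe (partition : List Int) (n : Int) :
    n ≤ ((pvRows partition n).length : Int) := by
  simp [pvRows]; omega

-- A's port computes floordiv of the two per-row products
theorem pvA_eq (partition : List Int) (n : Int) (h : ¬ partition = []) :
    su_rep_dim_from_partition partition n =
      PySem.Int.floordiv
        (((PySem.List.pyRange 0 ((pvRows partition n).length : Int)).map
            (fun i => pvRowNum n i (PySem.List.pyGetD (pvRows partition n) i 0))).prod)
        (((PySem.List.pyRange 0 ((pvRows partition n).length : Int)).map
            (fun i => pvRowDen (pvRows partition n) n i
              (PySem.List.pyGetD (pvRows partition n) i 0))).prod) := by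
  unfold su_rep_dim_from_partition
  rw [if_neg h]
  dsimp only
  rw [pvEnumFold (fun i r acc => (PySem.List.pyRange 0 r).foldl (fun acc2 j => acc2 ++ [(i, j)]) acc)]
  simp only [PySem.List.foldl_append_singleton_eq_map, PySem.List.foldl_append_eq_flatMap,
    List.nil_append]
  rw [PySem.List.enumerate_eq_map_pyRange (pvRows partition n) 0]
  rw [pvFoldMul, pvFoldMul]
  simp only [List.flatMap_map, List.map_flatMap, List.map_map]
  congr 1
  · rw [List.flatMap_def, List.prod_flatten, List.map_map]
    simp [pvRowNum, Function.comp_def]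
  · rw [List.flatMap_def, List.prod_flatten, List.map_map]
    simp [pvRowDen, pvLeg, Function.comp_def]

-- the inner j-loop of B multiplies the two row products into the accumulators
theorem pvInnerB_aux (n i r : Int) :
    ∀ (l : List Int) (a b : Int) (c : List Int),
      l.foldl (fun st2 j =>
          (st2.1 * (n + j - i), st2.2.1 * (r - j - 1 + pvCntGet st2.2.2 j + 1), st2.2.2))
        (a, b, c)
      = (a * (l.map (fun j => n + j - i)).prod,
         b * (l.map (fun j => r - j - 1 + pvCntGet c j + 1)).prod, c) := by
  intro l
  induction l with
  | nil => intro a b c; simp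
  | cons x l ih => intro a b c; simp [List.foldl_cons, ih, mul_assoc]

theorem pvBumpB_succ (k : Nat) (c : List Int) :
    pvBumpB c ((k : Int) + 1) =
      if (k : Int) < PySem.List.len (pvBumpB c (k : Int)) then
        PySem.List.pySetD (pvBumpB c (k : Int)) (k : Int)
          (PySem.List.pyGetD (pvBumpB c (k : Int)) (k : Int) 0 + 1)
      else pvBumpB c (k : Int) ++ [1] := by
  have hsplit : PySem.List.pyRange 0 ((k : Int) + 1) = PySem.List.pyRange 0 (k : Int) ++ [(k : Int)] :=
    PySem.List.pyRange_one_succ_right (by positivity)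
  simp only [pvBumpB]; rw [hsplit, List.foldl_append]; rfl

theorem pvBumpB_len_nat (k : Nat) :
    ∀ (c : List Int), (pvBumpB c (k : Int)).length = max c.length k := by
  induction k with
  | zero => intro c; simp [pvBumpB]
  | succ k ih =>
    intro c
    have hlen := ih c
    push_cast
    rw [pvBumpB_succ]
    by_cases hk : k < c.length
    · rw [if_pos (by simp [PySem.List.len, hlen]; omega)]
      simp [hlen]; omega
    · rw [if_neg (by simp [PySem.List.len, hlen]; omega)]
      simp [hlen]; omega

theorem pvBumpB_get_nat (k : Nat) :
    ∀ (c : List Int) (m : Nat),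
      pvCntGet (pvBumpB c (k : Int)) (m : Int)
        = pvCntGet c (m : Int) + (if (m : Int) < (k : Int) then 1 else 0) := by
  induction k with
  | zero => intro c m; simp [pvBumpB]
  | succ k ih =>
    intro c m
    have hlen := pvBumpB_len_nat k c
    have hkey : pvCntGet (pvBumpB c ((k : Int) + 1)) (m : Int)
        = pvCntGet (pvBumpB c (k : Int)) (m : Int) + (if m = k then 1 else 0) := by
      rw [pvBumpB_succ]
      by_cases hk : k < c.length
      · rw [if_pos (by simp [PySem.List.len, hlen]; omega)]
        simp only [PySem.List.pySetD_natCast, pvCntGet, PySem.List.len,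
          PySem.List.pyGetD_natCast, List.length_set]
        by_cases hmk : m = k
        · subst hmk
          rw [if_pos (by omega), if_pos (by omega)]
          have hkB : m < (pvBumpB c (m : Int)).length := by omega
          simp [List.getD, hkB]
        · simp only [hmk, if_false]
          by_cases hm : m < (pvBumpB c (k : Int)).length
          · rw [if_pos (by omega), if_pos (by omega)]
            simp [List.getD, Ne.symm hmk]
          · rw [if_neg (by omega), if_neg (by omega)]
            ring
      · rw [if_neg (by simp [PySem.List.len, hlen]; omega)]
        have hkb : (pvBumpB c (k : Int)).length = k := by omega
        simp only [pvCntGet, PySem.List.len, PySem.List.pyGetD_natCast, List.length_append,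
          List.length_singleton, hkb]
        by_cases hmk : m = k
        · subst hmk
          rw [if_pos (by omega), if_neg (by omega)]
          simp [List.getD, hkb]
        · by_cases hm : m < k
          · rw [if_pos (by omega), if_pos (by omega)]
            simp [List.getD,
              List.getElem?_append_left (by omega : m < (pvBumpB c (k : Int)).length), hmk]
          · rw [if_neg (by omega), if_neg (by omega)]
            simp [hmk]
    push_cast
    rw [hkey, ih c m]
    split_ifs <;> omega

theorem pvBumpB_get (c : List Int) (r : Int) (m : Nat) :
    pvCntGet (pvBumpB c r) (m : Int) = pvCntGet c (m : Int) + (if (m : Int) < r then 1 else 0) := by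
  by_cases hr : r ≤ 0
  · have : pvBumpB c r = c := by
      simp [pvBumpB, PySem.List.pyRange_one_eq_nil hr]
    rw [this, if_neg (by omega)]; ring
  · have : r = ((r.toNat : Nat) : Int) := by omega
    rw [this]; exact pvBumpB_get_nat r.toNat c m

-- init-shift for A's counting fold
theorem pvLeg_shift (rows : List Int) (j : Int) (l : List Int) :
    ∀ (a : Int), l.foldl (fun s ii => if PySem.List.pyGetD rows ii 0 > j then s + 1 else s) a
      = a + l.foldl (fun s ii => if PySem.List.pyGetD rows ii 0 > j then s + 1 else s) 0 := by
  induction l with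
  | nil => intro a; simp
  | cons x l ih =>
    intro a
    simp only [List.foldl_cons]
    rw [ih]
    conv_rhs => rw [ih]
    split_ifs <;> ring

theorem pvLeg_step (rows : List Int) (n i j : Int) :
    pvLeg rows n (i - 1) j
      = (if i < n ∧ PySem.List.pyGetD rows i 0 > j then 1 else 0) + pvLeg rows n i j := by
  by_cases hin : i < n
  · have : PySem.List.pyRange (i - 1 + 1) n = i :: PySem.List.pyRange (i + 1) n := by
      rw [show i - 1 + 1 = i by ring]; exact PySem.List.pyRange_one_cons hin
    simp only [pvLeg, this, List.foldl_cons]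
    rw [pvLeg_shift]
    by_cases hgt : PySem.List.pyGetD rows i 0 > j
    · simp [hin, hgt]
    · simp [hgt]
  · have h1 : PySem.List.pyRange (i - 1 + 1) n = [] := PySem.List.pyRange_one_eq_nil (by omega)
    have h2 : PySem.List.pyRange (i + 1) n = [] := PySem.List.pyRange_one_eq_nil (by omega)
    have h3 : PySem.List.pyRange i n = [] := PySem.List.pyRange_one_eq_nil (by omega)
    simp [pvLeg, h2, h3, hin]

-- main invariant of B's backward pass
theorem pvFoldDown (rows : List Int) (n : Int) :
    ∀ (k : Nat), ∀ (a b : Int) (c : List Int),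
      (∀ m : Nat, pvCntGet c (m : Int) = pvLeg rows n ((k : Int) - 1) (m : Int)) →
      (((PySem.List.pyRange ((k : Int) - 1) (-1) (-1)).foldl
            (fun st i => pvStepB n st (i, PySem.List.pyGetD rows i 0)) (a, b, c)).1
        = a * ((PySem.List.pyRange 0 (k : Int)).map
            (fun i => pvRowNum n i (PySem.List.pyGetD rows i 0))).prod)
      ∧ (((PySem.List.pyRange ((k : Int) - 1) (-1) (-1)).foldl
            (fun st i => pvStepB n st (i, PySem.List.pyGetD rows i 0)) (a, b, c)).2.1
        = b * ((PySem.List.pyRange 0 (k : Int)).map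
            (fun i => pvRowDen rows n i (PySem.List.pyGetD rows i 0))).prod) := by
  intro k
  induction k with
  | zero =>
    intro a b c _
    constructor <;>
      simp [PySem.List.pyRange_one_eq_nil (le_refl (0:Int))]
  | succ k ih =>
    intro a b c hc
    have hk1 : ((k + 1 : Nat) : Int) - 1 = (k : Int) := by push_cast; ring
    rw [hk1, PySem.List.pyRange_neg_one_cons (by omega : (-1 : Int) < ((k : Nat) : Int)),
      List.foldl_cons]
    have hc' : ∀ m : Nat, pvCntGet c (m : Int) = pvLeg rows n (k : Int) (m : Int) := by
      intro m
      have := hc m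
      rwa [hk1] at this
    have hstep : pvStepB n (a, b, c) ((k : Int), PySem.List.pyGetD rows (k : Int) 0)
        = (a * pvRowNum n (k : Int) (PySem.List.pyGetD rows (k : Int) 0),
           b * pvRowDen rows n (k : Int) (PySem.List.pyGetD rows (k : Int) 0),
           if (k : Int) < n then pvBumpB c (PySem.List.pyGetD rows (k : Int) 0) else c) := by
      unfold pvStepB pvInnerB
      dsimp only
      rw [pvInnerB_aux]
      have hden : (PySem.List.pyRange 0 (PySem.List.pyGetD rows (k : Int) 0)).map
            (fun j => PySem.List.pyGetD rows (k : Int) 0 - j - 1 + pvCntGet c j + 1)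
          = (PySem.List.pyRange 0 (PySem.List.pyGetD rows (k : Int) 0)).map
            (fun j => PySem.List.pyGetD rows (k : Int) 0 - j - 1 + pvLeg rows n (k : Int) j + 1) := by
        apply List.map_congr_left
        intro j hj
        have hj0 : 0 ≤ j := (PySem.List.mem_pyRange_one.mp hj).1
        lift j to Nat using hj0
        rw [hc' j]
      rw [hden]
      by_cases hkn : (k : Int) < n <;> simp [hkn, pvRowNum, pvRowDen]
    rw [hstep]
    set r := PySem.List.pyGetD rows (k : Int) 0 with hr
    have hcnew : ∀ m : Nat,
        pvCntGet (if (k : Int) < n then pvBumpB c r else c) (m : Int)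
          = pvLeg rows n ((k : Int) - 1) (m : Int) := by
      intro m
      rw [pvLeg_step rows n (k : Int) (m : Int)]
      by_cases hkn : (k : Int) < n
      · rw [if_pos hkn, pvBumpB_get c r m, hc' m]
        by_cases hmr : (m : Int) < r
        · rw [if_pos hmr, if_pos ⟨hkn, by omega⟩]; ring
        · rw [if_neg hmr, if_neg (by rw [← hr]; omega)]; ring
      · rw [if_neg hkn, if_neg (by tauto), hc' m]; ring
    have := ih (a * pvRowNum n (k : Int) r) (b * pvRowDen rows n (k : Int) r)
      (if (k : Int) < n then pvBumpB c r else c) hcnew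
    have hsucc : PySem.List.pyRange 0 ((k + 1 : Nat) : Int)
        = PySem.List.pyRange 0 (k : Int) ++ [(k : Int)] := by
      push_cast; exact PySem.List.pyRange_one_succ_right (by positivity)
    rw [this.1, this.2, hsucc]
    constructor <;> simp [List.prod_append, hr, PySem.List.pyGetD_natCast, List.getD] <;> ring

theorem pvB_eq (partition : List Int) (n : Int) (h : ¬ partition = []) :
    su_rep_dim_from_partition_alt partition n =
      PySem.Int.floordiv
        (((PySem.List.pyRange 0 ((pvRows partition n).length : Int)).map
            (fun i => pvRowNum n i (PySem.List.pyGetD (pvRows partition n) i 0))).prod)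
        (((PySem.List.pyRange 0 ((pvRows partition n).length : Int)).map
            (fun i => pvRowDen (pvRows partition n) n i
              (PySem.List.pyGetD (pvRows partition n) i 0))).prod) := by
  unfold su_rep_dim_from_partition_alt
  rw [if_neg h]
  have hnle := pvRows_nLe partition n
  have h0 : ∀ m : Nat, pvCntGet [] (m : Int)
      = pvLeg (pvRows partition n) n (((pvRows partition n).length : Int) - 1) (m : Int) := by
    intro m
    have hnil : PySem.List.pyRange (((pvRows partition n).length : Int)) n = [] := by
      apply PySem.List.pyRange_one_eq_nil; omega
    simp [pvCntGet, pvLeg, PySem.List.len, hnil]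
  have hmain := pvFoldDown (pvRows partition n) n (pvRows partition n).length 1 1 [] h0
  dsimp only
  rw [pvEnumRev (pvRows partition n) 0 [], List.append_nil]
  rw [PySem.List.enumerate_eq_map_pyRange (pvRows partition n) 0]
  have hrev : (PySem.List.pyRange 0 (PySem.List.len (pvRows partition n))).reverse
      = PySem.List.pyRange (((pvRows partition n).length : Int) - 1) (-1) (-1) := by
    rw [PySem.List.pyRange_neg_one_eq_reverse]
    norm_num [PySem.List.len]
  rw [← List.map_reverse, hrev, List.foldl_map]
  rw [hmain.1, hmain.2]
  simp

-- ===== VERDICT (by name: the statement is the Claim_ definition above) =====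
theorem su_rep_dim_from_partition_spec : Claim_equal_su_rep_dim_from_partition := by
  intro partition n _
  unfold Spec_su_rep_dim_from_partition
  by_cases h : partition = []
  · subst h; rfl
  · rw [pvA_eq partition n h, pvB_eq partition n h]
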